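-- pv_equiv track=rewrite | github.com/brewjunk/HackerRank | Mathematics/restaurant_2.py | restaurant
-- ===== SOURCE A (Python) =====
-- def restaurant(l,b):
--     if l > b:
--         num = l
--     else:
--         num = b
--     product = l*b
--     divisors = []
--
--     for i in range(1,num+1):
--         if l % i == 0 and b % i == 0 :
--             divisors.append(i)
--     if l == b:
--         return 1
--
--     return product//(divisors[-1]**2)
-- ===== SOURCE B (Python) =====
-- def restaurant(l, b):
--     if l == b:
--         return 1
--     a, r = l, b
--     while r:
--         a, r = r, a % r
--     return (l * b) // (a * a)
-- ===== Notes on version B (the rewrite author's own statement) =====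
-- stated objective: faster
-- what changed: Replaces the O(max(l,b)) scan that collects every common divisor into a list with an O(log min(l,b)) iterative Euclidean gcd loop, then returns l*b // g*g directly.
import Mathlib
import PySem

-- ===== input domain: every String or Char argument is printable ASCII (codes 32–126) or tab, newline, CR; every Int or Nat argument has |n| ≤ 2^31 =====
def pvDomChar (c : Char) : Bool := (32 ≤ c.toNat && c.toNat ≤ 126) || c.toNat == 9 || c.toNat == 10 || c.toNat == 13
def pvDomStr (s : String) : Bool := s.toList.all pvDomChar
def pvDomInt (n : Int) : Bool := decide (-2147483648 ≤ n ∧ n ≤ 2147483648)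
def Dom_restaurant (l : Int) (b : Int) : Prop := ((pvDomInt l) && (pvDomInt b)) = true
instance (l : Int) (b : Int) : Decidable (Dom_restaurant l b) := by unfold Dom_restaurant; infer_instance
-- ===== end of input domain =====

-- B replaces A's linear scan over 1..max(l,b) collecting all common divisors with an
-- iterative Euclidean gcd loop (objective: faster, asymptotically).

-- ===== PORT A =====
def restaurant (l : Int) (b : Int) : Int :=
  let num := if l > b then l else b
  let product := l * b
  let divisors := (PySem.List.pyRange 1 (num + 1) 1).foldl
    (fun acc i => if PySem.Int.mod l i = 0 ∧ PySem.Int.mod b i = 0 then acc ++ [i] else acc) []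
  if l = b then 1
  else
    match PySem.List.pyGet? divisors (-1) with
    | some d => PySem.Int.floordiv product (d ^ 2)
    | none => 0   -- Python raises IndexError here; excluded by Pre_restaurant

-- ===== PORT B =====
-- termination fact for the Euclidean loop (cited by the port's decreasing_by)
theorem pvModAbsLt (a r : Int) (h : r ≠ 0) :
    (PySem.Int.mod a r).natAbs < r.natAbs := by
  rcases lt_or_gt_of_ne h with hr | hr
  · have := PySem.Int.mod_neg_bounds a hr
    omega
  · have h1 := PySem.Int.mod_nonneg a hr
    have h2 := PySem.Int.mod_lt a hr
    omega

-- 'a, r = l, b; while r: a, r = r, a % r'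
def pvEuclid (a : Int) (r : Int) : Int :=
  if h : r = 0 then a else pvEuclid r (PySem.Int.mod a r)
termination_by r.natAbs
decreasing_by exact pvModAbsLt a r h

def restaurant_alt (l : Int) (b : Int) : Int :=
  if l = b then 1
  else
    let g := pvEuclid l b
    PySem.Int.floordiv (l * b) (g * g)

-- ===== PRECONDITION & SPEC =====
-- Pre_ excludes exactly the inputs where A raises IndexError (empty divisor list):
-- l ≠ b with both arguments ≤ 0.
def Pre_restaurant (l : Int) (b : Int) : Prop := l = b ∨ 0 < l ∨ 0 < b
instance (l : Int) (b : Int) : Decidable (Pre_restaurant l b) := by unfold Pre_restaurant; infer_instance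
def pvWitness_restaurant : Int × Int := (4, 6)

def Spec_restaurant (l : Int) (b : Int) (out : Int) : Prop := out = restaurant_alt l b
instance (l : Int) (b : Int) (out : Int) : Decidable (Spec_restaurant l b out) := by unfold Spec_restaurant; infer_instance

-- ===== CLAIM (what is proved, stated in full; the proofs are below) =====
def Claim_equal_restaurant : Prop := ∀ (l : Int) (b : Int), Dom_restaurant l b → Pre_restaurant l b → Spec_restaurant l b (restaurant l b)

-- ===== LEMMAS AND PROOFS =====

-- the Euclidean loop computes the gcd up to sign
theorem pvEuclid_natAbs (a r : Int) : (pvEuclid a r).natAbs = Int.gcd a r := by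
  by_cases h : r = 0
  · subst h; rw [pvEuclid]; simp [Int.gcd]
  · rw [pvEuclid, dif_neg h]
    have ih := pvEuclid_natAbs r (PySem.Int.mod a r)
    rw [ih]
    have hm : PySem.Int.mod a r = a - PySem.Int.floordiv a r * r := by
      have := PySem.Int.floordiv_mul_add_mod a r
      omega
    rw [hm]
    rw [Int.gcd_comm a r]
    conv_rhs => rw [show a = (a - PySem.Int.floordiv a r * r) + r * PySem.Int.floordiv a r by ring]
    rw [Int.gcd_add_mul_left_right]
termination_by r.natAbs
decreasing_by exact pvModAbsLt a r h

-- last element of a filtered increasing list is g when g is in the list, passes the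
-- filter, and dominates every element passing the filter
theorem pvFilterLast {p : Int → Bool} {xs : List Int} {g : Int}
    (hs : xs.Pairwise (· < ·)) (hg : g ∈ xs) (hpg : p g = true)
    (hub : ∀ x ∈ xs, p x = true → x ≤ g) :
    (xs.filter p).getLast? = some g := by
  induction xs with
  | nil => cases hg
  | cons x xs ih =>
    rcases List.pairwise_cons.1 hs with ⟨hx, hs'⟩
    rcases List.mem_cons.1 hg with rfl | hg'
    · -- head is g; everything after is > g so filter of tail is empty
      have htail : xs.filter p = [] := by
        rw [List.filter_eq_nil_iff]
        intro y hy hpy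
        have h1 := hx y hy
        have h2 := hub y (List.mem_cons_of_mem _ hy) hpy
        omega
      simp [hpg, htail]
    · have hlast := ih hs' hg' (fun y hy hpy => hub y (List.mem_cons_of_mem _ hy) hpy)
      have hne : xs.filter p ≠ [] := by
        intro hnil; rw [hnil] at hlast; simp at hlast
      rw [List.filter_cons]
      by_cases hpx : p x = true
      · simp only [hpx, if_true]
        rw [List.getLast?_cons, hlast]; rfl
      · simp [hpx, hlast]

theorem pvMain (l b : Int) (hne : l ≠ b) (hpos : 0 < l ∨ 0 < b) :
    restaurant l b = restaurant_alt l b := by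
  set num : Int := if l > b then l else b with hnum
  have hnumpos : 0 < num := by
    rcases hpos with h | h <;> simp only [hnum] <;> split <;> omega
  have hnz : l ≠ 0 ∨ b ≠ 0 := by
    rcases hpos with h | h
    · left; omega
    · right; omega
  set g : Int := (Int.gcd l b : Int) with hgdef
  have hgpos : 0 < g := by
    have : Int.gcd l b ≠ 0 := by
      simp only [Ne, Int.gcd_eq_zero_iff]
      rintro ⟨h1, h2⟩; rcases hnz with h | h <;> contradiction
    omega
  have hgl : g ∣ l := by rw [hgdef]; exact Int.gcd_dvd_left l b
  have hgb : g ∣ b := by rw [hgdef]; exact Int.gcd_dvd_right l b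
  have hgle : g ≤ num := by
    have h1 : l ≤ num := by simp only [hnum]; split <;> omega
    have h2 : b ≤ num := by simp only [hnum]; split <;> omega
    rcases hpos with h | h
    · exact le_trans (Int.le_of_dvd h hgl) h1
    · exact le_trans (Int.le_of_dvd h hgb) h2
  -- the divisors list and its last element
  have hlast :
      ((PySem.List.pyRange 1 (num + 1) 1).foldl
        (fun acc i => if PySem.Int.mod l i = 0 ∧ PySem.Int.mod b i = 0 then acc ++ [i] else acc)
        []).getLast? = some g := by
    rw [PySem.List.foldl_append_ite_eq_filter]
    rw [List.nil_append]
    apply pvFilterLast (PySem.List.pairwise_lt_pyRange_one 1 (num + 1))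
    · rw [PySem.List.mem_pyRange_one]; omega
    · simp only [decide_eq_true_eq]
      exact ⟨(PySem.Int.mod_eq_zero_iff_dvd l g).2 hgl, (PySem.Int.mod_eq_zero_iff_dvd b g).2 hgb⟩
    · intro x hx hpx
      rw [PySem.List.mem_pyRange_one] at hx
      simp only [decide_eq_true_eq] at hpx
      have hxl : x ∣ l := (PySem.Int.mod_eq_zero_iff_dvd l x).1 hpx.1
      have hxb : x ∣ b := (PySem.Int.mod_eq_zero_iff_dvd b x).1 hpx.2
      rw [hgdef]
      rw [hgdef] at hgpos
      exact Int.le_of_dvd hgpos (Int.dvd_coe_gcd hxl hxb)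
  -- the Euclid result squares to g squared
  have hsq : pvEuclid l b * pvEuclid l b = g ^ 2 := by
    have h1 : (pvEuclid l b).natAbs = Int.gcd l b := pvEuclid_natAbs l b
    calc pvEuclid l b * pvEuclid l b
        = (((pvEuclid l b).natAbs * (pvEuclid l b).natAbs : Nat) : Int) := Int.natAbs_mul_self.symm
      _ = ((Int.gcd l b * Int.gcd l b : Nat) : Int) := by rw [h1]
      _ = g ^ 2 := by rw [hgdef]; push_cast; ring
  unfold restaurant restaurant_alt
  simp only [if_neg hne]
  rw [PySem.List.pyGet?_neg_one, hlast, hsq]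

-- ===== VERDICT (by name: the statement is the Claim_ definition above) =====
theorem restaurant_spec : Claim_equal_restaurant := by
  intro l b _hdom hpre
  unfold Spec_restaurant
  by_cases heq : l = b
  · subst heq; unfold restaurant restaurant_alt; simp
  · rcases hpre with h | h
    · exact absurd h heq
    · exact pvMain l b heq h
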